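-- pv_equiv track=rewrite | github.com/Vamsi-Krishna-Gottumukkala/ProteinPredictor | src/pipeline.py | _generate_realistic_ss
-- ===== SOURCE A (Python) =====
-- def _generate_realistic_ss(seq_len):
--     """Fallback SS generation for templates."""
--     ss = []
--     for i in range(seq_len):
--         if 3 <= i < 12: ss.append('H')
--         elif 15 <= i < 20: ss.append('E')
--         elif 22 <= i < 32: ss.append('H')
--         elif 34 <= i < 38: ss.append('E')
--         else: ss.append('C')
--     return ''.join(ss)
-- ===== SOURCE B (Python) =====
-- _PATTERN = 'CCC' + 'H' * 9 + 'CCC' + 'E' * 5 + 'CC' + 'H' * 10 + 'CC' + 'E' * 4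
--
-- def _generate_realistic_ss(seq_len):
--     """Fallback SS generation for templates."""
--     if seq_len < 0:
--         return ''
--     if seq_len <= 38:
--         return _PATTERN[:seq_len]
--     return _PATTERN + 'C' * (seq_len - 38)
-- ===== Notes on version B (the rewrite author's own statement) =====
-- stated objective: faster
-- what changed: Replaces the per-position loop of range checks by a precomputed 38-char template that is sliced (seq_len <= 38) or padded with 'C' (seq_len > 38).
import Mathlib
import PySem

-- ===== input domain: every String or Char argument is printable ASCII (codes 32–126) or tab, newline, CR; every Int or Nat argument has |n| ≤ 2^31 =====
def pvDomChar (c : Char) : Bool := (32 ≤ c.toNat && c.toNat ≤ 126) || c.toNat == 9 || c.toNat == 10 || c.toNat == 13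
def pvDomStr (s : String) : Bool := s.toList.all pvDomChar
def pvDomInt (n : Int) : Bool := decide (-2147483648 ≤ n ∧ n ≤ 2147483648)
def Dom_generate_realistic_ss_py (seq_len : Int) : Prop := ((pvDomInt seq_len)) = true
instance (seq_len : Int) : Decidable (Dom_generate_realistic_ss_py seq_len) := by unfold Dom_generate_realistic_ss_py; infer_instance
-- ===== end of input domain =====

-- B replaces A's per-position range-check loop with a precomputed 38-char template,
-- sliced for short lengths and padded with 'C' for long ones (objective: faster, constant factor).

-- ===== PORT A =====
-- literal port: build the char list position by position, branching on i, then join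
def generate_realistic_ss_py (seq_len : Int) : String :=
  String.mk ((PySem.List.pyRange 0 seq_len 1).foldl (fun ss i =>
    ss ++ [if 3 ≤ i ∧ i < 12 then 'H'
           else if 15 ≤ i ∧ i < 20 then 'E'
           else if 22 ≤ i ∧ i < 32 then 'H'
           else if 34 ≤ i ∧ i < 38 then 'E'
           else 'C']) [])

-- ===== PORT B =====
def ssPattern : List Char := "CCCHHHHHHHHHCCCEEEEECCHHHHHHHHHHCCEEEE".toList

def generate_realistic_ss_py_alt (seq_len : Int) : String :=
  if seq_len < 0 then ""
  else if seq_len ≤ 38 then String.mk (ssPattern.take seq_len.toNat)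
  else String.mk (ssPattern ++ List.replicate (seq_len - 38).toNat 'C')

-- ===== PRECONDITION & SPEC =====
def Spec_generate_realistic_ss_py (seq_len : Int) (out : String) : Prop := out = generate_realistic_ss_py_alt seq_len
instance (seq_len : Int) (out : String) : Decidable (Spec_generate_realistic_ss_py seq_len out) := by unfold Spec_generate_realistic_ss_py; infer_instance

-- ===== CLAIM (what is proved, stated in full; the proofs are below) =====
def Claim_equal_generate_realistic_ss_py : Prop := ∀ (seq_len : Int), Dom_generate_realistic_ss_py seq_len → Spec_generate_realistic_ss_py seq_len (generate_realistic_ss_py seq_len)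

-- ===== LEMMAS AND PROOFS =====

def ssChar (i : Int) : Char :=
  if 3 ≤ i ∧ i < 12 then 'H'
  else if 15 ≤ i ∧ i < 20 then 'E'
  else if 22 ≤ i ∧ i < 32 then 'H'
  else if 34 ≤ i ∧ i < 38 then 'E'
  else 'C'

-- the loop of A, over the first k positions, equals template-take plus 'C'-padding
theorem ss_core (k : ℕ) :
    (PySem.List.pyRange 0 (k : Int) 1).foldl (fun ss i => ss ++ [ssChar i]) []
      = ssPattern.take k ++ List.replicate (k - 38) 'C' := by
  induction k with
  | zero => decide
  | succ k ih =>
    have hsr : PySem.List.pyRange 0 ((k : Int) + 1) 1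
        = PySem.List.pyRange 0 (k : Int) 1 ++ [(k : Int)] :=
      PySem.List.pyRange_one_succ_right (by exact_mod_cast Nat.zero_le k)
    have : ((k + 1 : ℕ) : Int) = (k : Int) + 1 := by push_cast; ring
    rw [this, hsr, List.foldl_append, ih]
    simp only [List.foldl_cons, List.foldl_nil]
    by_cases hk : k < 38
    · interval_cases k <;> decide
    · have h38 : 38 ≤ k := Nat.le_of_not_lt hk
      have hch : ssChar (k : Int) = 'C' := by
        unfold ssChar
        have : ¬ ((3:Int) ≤ (k:Int) ∧ (k:Int) < 12) := by omega
        rw [if_neg this]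
        have : ¬ ((15:Int) ≤ (k:Int) ∧ (k:Int) < 20) := by omega
        rw [if_neg this]
        have : ¬ ((22:Int) ≤ (k:Int) ∧ (k:Int) < 32) := by omega
        rw [if_neg this]
        have : ¬ ((34:Int) ≤ (k:Int) ∧ (k:Int) < 38) := by omega
        rw [if_neg this]
      have hlen : ssPattern.length = 38 := by decide
      have ht1 : ssPattern.take (k + 1) = ssPattern := List.take_of_length_le (by omega)
      have ht2 : ssPattern.take k = ssPattern := List.take_of_length_le (by omega)
      have hrep : k + 1 - 38 = (k - 38) + 1 := by omega
      rw [hch, ht1, ht2, hrep, List.replicate_succ', List.append_assoc]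

-- ===== VERDICT (by name: the statement is the Claim_ definition above) =====
theorem generate_realistic_ss_py_spec : Claim_equal_generate_realistic_ss_py := by
  intro n _
  show generate_realistic_ss_py n = generate_realistic_ss_py_alt n
  unfold generate_realistic_ss_py generate_realistic_ss_py_alt
  by_cases hneg : n < 0
  · rw [if_pos hneg, PySem.List.pyRange_one_eq_nil (by omega)]
    rfl
  · rw [if_neg hneg]
    have hn : ((n.toNat : ℕ) : Int) = n := Int.toNat_of_nonneg (Int.not_lt.mp hneg)
    have hcore := ss_core n.toNat
    rw [hn] at hcore
    have heq : (fun (ss : List Char) (i : Int) => ss ++ [ssChar i])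
        = (fun ss i => ss ++ [if 3 ≤ i ∧ i < 12 then 'H'
           else if 15 ≤ i ∧ i < 20 then 'E'
           else if 22 ≤ i ∧ i < 32 then 'H'
           else if 34 ≤ i ∧ i < 38 then 'E'
           else 'C']) := rfl
    rw [← heq, hcore]
    by_cases hle : n ≤ 38
    · rw [if_pos hle]
      have : n.toNat - 38 = 0 := by omega
      rw [this, List.replicate_zero, List.append_nil]
    · rw [if_neg hle]
      have ht : ssPattern.take n.toNat = ssPattern :=
        List.take_of_length_le (by rw [show ssPattern.length = 38 from by decide]; omega)
      have hr : n.toNat - 38 = (n - 38).toNat := by omega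
      rw [ht, hr]
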